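-- pv_equiv track=rewrite | github.com/mrkirby153/AdventOfCode2022 | day10/day10.py | sprite_position
-- ===== SOURCE A (Python) =====
-- def sprite_position(x):
--     pos = ""
--     for i in range(40):
--         if x - 1 <= i <= x + 1:
--             pos += '█'
--         else:
--             pos += ' '
--     return pos
-- ===== SOURCE B (Python) =====
-- def sprite_position(x):
--     lo = max(0, x - 1)
--     hi = min(39, x + 1)
--     if hi < lo:
--         return ' ' * 40
--     return ' ' * lo + '\u2588' * (hi - lo + 1) + ' ' * (39 - hi)
-- ===== Notes on version B (the rewrite author's own statement) =====
-- stated objective: simpler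
-- what changed: Replaces the per-cell loop with a branch for every screen column by boundary arithmetic (clamped sprite span) and three constant string repetitions.
import Mathlib
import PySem

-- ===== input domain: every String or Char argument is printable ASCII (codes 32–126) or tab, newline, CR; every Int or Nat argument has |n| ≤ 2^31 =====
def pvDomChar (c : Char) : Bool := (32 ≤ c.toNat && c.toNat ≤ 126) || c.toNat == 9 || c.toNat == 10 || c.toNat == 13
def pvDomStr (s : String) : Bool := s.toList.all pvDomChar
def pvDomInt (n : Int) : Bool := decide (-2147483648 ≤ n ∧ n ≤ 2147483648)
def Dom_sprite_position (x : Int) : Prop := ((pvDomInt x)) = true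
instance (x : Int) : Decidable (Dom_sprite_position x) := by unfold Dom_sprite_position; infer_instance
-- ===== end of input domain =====

-- B replaces the 40-iteration per-cell loop by clamped-span arithmetic and three constant string runs (objective: simpler).

-- ===== PORT A =====
def sprite_position (x : Int) : String :=
  (PySem.List.pyRange 0 40 1).foldl
    (fun pos i => pos ++ (if x - 1 ≤ i ∧ i ≤ x + 1 then "█" else " ")) ""

-- ===== PORT B =====
def sprite_position_alt (x : Int) : String :=
  let lo := max 0 (x - 1)
  let hi := min 39 (x + 1)
  if hi < lo then String.ofList (List.replicate 40 ' ')
  else String.ofList (List.replicate lo.toNat ' ')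
       ++ String.ofList (List.replicate (hi - lo + 1).toNat '█')
       ++ String.ofList (List.replicate (39 - hi).toNat ' ')

-- ===== PRECONDITION & SPEC =====
def Spec_sprite_position (x : Int) (out : String) : Prop := out = sprite_position_alt x
instance (x : Int) (out : String) : Decidable (Spec_sprite_position x out) := by unfold Spec_sprite_position; infer_instance

-- ===== CLAIM (what is proved, stated in full; the proofs are below) =====
def Claim_equal_sprite_position : Prop := ∀ (x : Int), Dom_sprite_position x → Spec_sprite_position x (sprite_position x)

-- ===== LEMMAS AND PROOFS =====

-- If the sprite condition is false for every element of the list, A's fold appends only spaces.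
theorem foldl_all_spaces (x : Int) (l : List Int)
    (h : ∀ i ∈ l, ¬(x - 1 ≤ i ∧ i ≤ x + 1)) (s : String) :
    l.foldl (fun pos i => pos ++ (if x - 1 ≤ i ∧ i ≤ x + 1 then "█" else " ")) s
      = s ++ String.ofList (List.replicate l.length ' ') := by
  induction l generalizing s with
  | nil => simp
  | cons a t ih =>
    have ha : ¬(x - 1 ≤ a ∧ a ≤ x + 1) := h a (by simp)
    simp only [List.foldl_cons, if_neg ha]
    rw [ih (fun i hi => h i (by simp [hi]))]
    simp [String.ext_iff, List.replicate_succ]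


-- If the sprite condition is true for every element of the list, A's fold appends only blocks.
theorem foldl_all_blocks (x : Int) (l : List Int)
    (h : ∀ i ∈ l, x - 1 ≤ i ∧ i ≤ x + 1) (s : String) :
    l.foldl (fun pos i => pos ++ (if x - 1 ≤ i ∧ i ≤ x + 1 then "█" else " ")) s
      = s ++ String.ofList (List.replicate l.length '█') := by
  induction l generalizing s with
  | nil => simp
  | cons a t ih =>
    have ha : x - 1 ≤ a ∧ a ≤ x + 1 := h a (by simp)
    simp only [List.foldl_cons, if_pos ha]
    rw [ih (fun i hi => h i (by simp [hi]))]
    simp [String.ext_iff, List.replicate_succ]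


theorem offscreen_A (x : Int) (hx : x ≤ -2 ∨ 41 ≤ x) :
    sprite_position x = String.ofList (List.replicate 40 ' ') := by
  unfold sprite_position
  rw [foldl_all_spaces]
  · simp [PySem.List.length_pyRange_one]
  · intro i hi
    rw [PySem.List.mem_pyRange_one] at hi
    rcases hx with h | h <;> omega

-- ===== VERDICT (by name: the statement is the Claim_ definition above) =====
theorem sprite_position_spec : Claim_equal_sprite_position := by
  intro x _
  unfold Spec_sprite_position
  by_cases h1 : x ≤ -2
  · rw [offscreen_A x (Or.inl h1)]
    unfold sprite_position_alt
    rw [if_pos (by omega)]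
  · by_cases h2 : 41 ≤ x
    · rw [offscreen_A x (Or.inr h2)]
      unfold sprite_position_alt
      rw [if_pos (by simp; omega)]
    · -- on-screen: -1 ≤ x ≤ 40; split the range at lo and hi+1
      have hx1 : -1 ≤ x := by omega
      have hx2 : x ≤ 40 := by omega
      set lo : Int := max 0 (x - 1) with hlo
      set hi : Int := min 39 (x + 1) with hhi
      have hlo0 : 0 ≤ lo := by omega
      have hlohi : lo ≤ hi + 1 := by omega
      have hhi40 : hi + 1 ≤ 40 := by omega
      have hsplit : PySem.List.pyRange 0 40 1
          = (PySem.List.pyRange 0 lo 1 ++ PySem.List.pyRange lo (hi+1) 1)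
            ++ PySem.List.pyRange (hi+1) 40 1 := by
        rw [← PySem.List.pyRange_one_append 0 lo (hi+1) hlo0 hlohi,
            ← PySem.List.pyRange_one_append 0 (hi+1) 40 (by omega) hhi40]
      unfold sprite_position
      rw [hsplit, List.foldl_append, List.foldl_append]
      rw [foldl_all_spaces x _ (by intro i hi'; rw [PySem.List.mem_pyRange_one] at hi'; omega)]
      rw [foldl_all_blocks x _ (by intro i hi'; rw [PySem.List.mem_pyRange_one] at hi'; omega)]
      rw [foldl_all_spaces x _ (by intro i hi'; rw [PySem.List.mem_pyRange_one] at hi'; omega)]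
      unfold sprite_position_alt
      rw [if_neg (by omega)]
      simp only [PySem.List.length_pyRange_one, String.ext_iff, ← hlo, ← hhi]
      have e1 : (hi + 1 - lo).toNat = (hi - lo + 1).toNat := by omega
      have e2 : (40 - (hi + 1)).toNat = (39 - hi).toNat := by omega
      simp [e1, e2, List.append_assoc]
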